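-- pv_equiv track=rewrite | github.com/krismaz/Thesis | Other/Networks.py | ThreeWayMerge
-- ===== SOURCE A (Python) =====
-- def ThreeWayMerge(inputs):
-- 	if len(inputs)>3:
-- 		parts = [inputs[i::3] for i in range(3)]
-- 		for part in parts:
-- 			yield from ThreeWayMerge(part)
-- 		yield from zip(parts[2], parts[0][2:])
-- 		yield from zip(parts[1], parts[0][1:])
-- 		yield from zip(parts[2], parts[1][1:])
-- 		yield from zip(parts[2], parts[0][1:])
-- 	elif len(inputs) == 2:
-- 		yield (inputs[0], inputs[1])
-- 	elif len(inputs) == 3: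
-- 		yield from [(inputs[0], inputs[1]), (inputs[0], inputs[2]), (inputs[1], inputs[2])]
-- ===== SOURCE B (Python) =====
-- def ThreeWayMerge(inputs):
--     # Iterative DFS with an explicit work stack replacing the recursion:
--     # 'in' frames process an input list, 'zip' frames emit the deferred
--     # comparator zips after all three sub-parts have been emitted.
--     stack = [('in', inputs)]
--     while stack:
--         tag, payload = stack.pop()
--         if tag == 'in':
--             n = len(payload)
--             if n > 3:
--                 parts = [payload[i::3] for i in range(3)]
--                 stack.append(('zip', parts))
--                 stack.append(('in', parts[2]))
--                 stack.append(('in', parts[1]))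
--                 stack.append(('in', parts[0]))
--             elif n == 2:
--                 yield (payload[0], payload[1])
--             elif n == 3:
--                 yield (payload[0], payload[1])
--                 yield (payload[0], payload[2])
--                 yield (payload[1], payload[2])
--         else:
--             p0, p1, p2 = payload
--             yield from zip(p2, p0[2:])
--             yield from zip(p1, p0[1:])
--             yield from zip(p2, p1[1:])
--             yield from zip(p2, p0[1:])
-- ===== Notes on version B (the rewrite author's own statement) =====
-- stated objective: alternative
-- what changed: The recursive generator is replaced by an iterative DFS over an explicit work stack whose frames are either pending input lists or deferred zip-emission tasks, reproducing the same post-order emission without recursion.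
import Mathlib
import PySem

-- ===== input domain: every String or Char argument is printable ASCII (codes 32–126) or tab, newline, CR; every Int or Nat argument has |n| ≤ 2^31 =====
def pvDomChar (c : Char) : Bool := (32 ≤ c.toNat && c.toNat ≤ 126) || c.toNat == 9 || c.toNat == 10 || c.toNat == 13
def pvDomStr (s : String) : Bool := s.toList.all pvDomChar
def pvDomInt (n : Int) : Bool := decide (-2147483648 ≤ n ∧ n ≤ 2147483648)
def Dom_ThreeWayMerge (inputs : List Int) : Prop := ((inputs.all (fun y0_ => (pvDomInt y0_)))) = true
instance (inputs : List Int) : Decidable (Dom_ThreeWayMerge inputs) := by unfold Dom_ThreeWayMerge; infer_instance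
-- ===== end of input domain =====

-- B replaces A's recursive generator by an iterative explicit-stack DFS emitting the
-- same comparator pairs in the same post-order (objective: alternative decomposition).

-- Shared helper: Python's step slice l[i::3] for 0 ≤ i is every3 (l.drop i).
-- Exact for a nonnegative start and step 3 (the only form both Pythons use).
def every3 {α : Type} : List α → List α
  | [] => []
  | [x] => [x]
  | [x, _] => [x]
  | x :: _ :: _ :: rest => x :: every3 rest


-- Length of a step-3 slice (cited by both ports' termination proofs).
lemma every3_length_aux {α : Type} (l : List α) : (every3 l).length = (l.length + 2) / 3 := by
  induction l using every3.induct <;> simp [every3, *] <;> omega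

-- Weight inequality for the stack step (cited by pvRun's termination proof).
lemma pvPowStep (n : Nat) (h : 3 < n) :
    2 ^ ((n + 2) / 3) + 2 ^ ((n - 1 + 2) / 3) + 2 ^ ((n - 2 + 2) / 3) + 1 < 2 ^ n := by
  have ha : 2 ^ ((n + 2) / 3) ≤ 2 ^ (n - 2) := Nat.pow_le_pow_right (by omega) (by omega)
  have hb : 2 ^ ((n - 1 + 2) / 3) ≤ 2 ^ (n - 2) := Nat.pow_le_pow_right (by omega) (by omega)
  have hc : 2 ^ ((n - 2 + 2) / 3) ≤ 2 ^ (n - 2) := Nat.pow_le_pow_right (by omega) (by omega)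
  have hd : 1 < 2 ^ (n - 2) := Nat.one_lt_two_pow (by omega)
  have he : 2 ^ n = 2 ^ (n - 2) * 2 ^ 2 := by
    rw [← pow_add]; congr 1; omega
  simp only [pow_succ, pow_zero] at he
  omega

-- ===== PORT A =====
-- parts[0] = every3 inputs, parts[1] = every3 (inputs.drop 1), parts[2] = every3 (inputs.drop 2);
-- the 'for part in parts' loop over the 3-element parts list is unrolled.
-- Indexing inputs[0]/inputs[1]/inputs[2] uses pyGetD with default 0: in range under the
-- branch's length test, so exact.
def ThreeWayMerge (inputs : List Int) : List (Int × Int) :=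
  if inputs.length > 3 then
    ThreeWayMerge (every3 inputs) ++
    ThreeWayMerge (every3 (inputs.drop 1)) ++
    ThreeWayMerge (every3 (inputs.drop 2)) ++
    (every3 (inputs.drop 2)).zip ((every3 inputs).drop 2) ++
    (every3 (inputs.drop 1)).zip ((every3 inputs).drop 1) ++
    (every3 (inputs.drop 2)).zip ((every3 (inputs.drop 1)).drop 1) ++
    (every3 (inputs.drop 2)).zip ((every3 inputs).drop 1)
  else if inputs.length = 2 then
    [(PySem.List.pyGetD inputs 0 0, PySem.List.pyGetD inputs 1 0)]
  else if inputs.length = 3 then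
    [(PySem.List.pyGetD inputs 0 0, PySem.List.pyGetD inputs 1 0),
     (PySem.List.pyGetD inputs 0 0, PySem.List.pyGetD inputs 2 0),
     (PySem.List.pyGetD inputs 1 0, PySem.List.pyGetD inputs 2 0)]
  else []
termination_by inputs.length
decreasing_by
  all_goals
    simp only [every3_length_aux, List.length_drop]
    omega

-- ===== PORT B =====
-- Work-stack frames: 'inp l' = a pending ('in', l) entry, 'zips p0 p1 p2' = a deferred
-- ('zip', parts) entry.
inductive PVFrame : Type
  | inp : List Int → PVFrame
  | zips : List Int → List Int → List Int → PVFrame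

def pvFrameW : PVFrame → Nat
  | .inp l => 2 ^ l.length
  | .zips _ _ _ => 1

def pvStackW (s : List PVFrame) : Nat := (s.map pvFrameW).sum

def pvRun : List PVFrame → List (Int × Int)
  | [] => []
  | .zips p0 p1 p2 :: rest =>
      p2.zip (p0.drop 2) ++ p1.zip (p0.drop 1) ++ p2.zip (p1.drop 1) ++
      p2.zip (p0.drop 1) ++ pvRun rest
  | .inp l :: rest =>
      if l.length > 3 then
        pvRun (.inp (every3 l) :: .inp (every3 (l.drop 1)) :: .inp (every3 (l.drop 2)) ::
               .zips (every3 l) (every3 (l.drop 1)) (every3 (l.drop 2)) :: rest)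
      else if l.length = 2 then
        (PySem.List.pyGetD l 0 0, PySem.List.pyGetD l 1 0) :: pvRun rest
      else if l.length = 3 then
        (PySem.List.pyGetD l 0 0, PySem.List.pyGetD l 1 0) ::
        (PySem.List.pyGetD l 0 0, PySem.List.pyGetD l 2 0) ::
        (PySem.List.pyGetD l 1 0, PySem.List.pyGetD l 2 0) :: pvRun rest
      else pvRun rest
termination_by s => pvStackW s
decreasing_by
  · simp only [pvStackW, List.map_cons, List.sum_cons, pvFrameW]; omega
  · simp only [pvStackW, List.map_cons, List.sum_cons, pvFrameW,
      every3_length_aux, List.length_drop]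
    have := pvPowStep l.length ‹l.length > 3›
    omega
  · simp only [pvStackW, List.map_cons, List.sum_cons, pvFrameW]
    have : 0 < 2 ^ l.length := Nat.two_pow_pos _
    omega
  · simp only [pvStackW, List.map_cons, List.sum_cons, pvFrameW]
    have : 0 < 2 ^ l.length := Nat.two_pow_pos _
    omega
  · simp only [pvStackW, List.map_cons, List.sum_cons, pvFrameW]
    have : 0 < 2 ^ l.length := Nat.two_pow_pos _
    omega

def ThreeWayMerge_alt (inputs : List Int) : List (Int × Int) :=
  pvRun [.inp inputs]

-- ===== PRECONDITION & SPEC =====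
def Spec_ThreeWayMerge (inputs : List Int) (out : List (Int × Int)) : Prop := out = ThreeWayMerge_alt inputs
instance (inputs : List Int) (out : List (Int × Int)) : Decidable (Spec_ThreeWayMerge inputs out) := by unfold Spec_ThreeWayMerge; infer_instance

-- ===== CLAIM (what is proved, stated in full; the proofs are below) =====
def Claim_equal_ThreeWayMerge : Prop := ∀ (inputs : List Int), Dom_ThreeWayMerge inputs → Spec_ThreeWayMerge inputs (ThreeWayMerge inputs)

-- ===== LEMMAS AND PROOFS =====

lemma pvRun_inp (n : Nat) : ∀ (l : List Int), l.length = n →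
    ∀ rest, pvRun (.inp l :: rest) = ThreeWayMerge l ++ pvRun rest := by
  induction n using Nat.strong_induction_on with
  | _ n ih =>
    intro l hl rest
    rw [pvRun, ThreeWayMerge]
    by_cases h3 : l.length > 3
    · have h0 : (every3 l).length < n := by
        have := every3_length_aux l; omega
      have h1 : (every3 (l.drop 1)).length < n := by
        have := every3_length_aux (l.drop 1); simp only [List.length_drop] at this; omega
      have h2 : (every3 (l.drop 2)).length < n := by
        have := every3_length_aux (l.drop 2); simp only [List.length_drop] at this; omega
      simp only [h3, if_pos]
      rw [ih _ h0 _ rfl, ih _ h1 _ rfl, ih _ h2 _ rfl, pvRun]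
      simp [List.append_assoc]
    · simp only [h3, if_false]
      by_cases h2 : l.length = 2
      · simp [h2]
      · by_cases he : l.length = 3 <;> simp [h2, he]

-- ===== VERDICT (by name: the statement is the Claim_ definition above) =====
theorem ThreeWayMerge_spec : Claim_equal_ThreeWayMerge := by
  intro inputs _
  unfold Spec_ThreeWayMerge ThreeWayMerge_alt
  rw [pvRun_inp inputs.length inputs rfl []]
  simp [pvRun]
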